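-- pv_equiv track=rewrite | github.com/deepak01-Hacker/DSABusted | String/Minimum times A has to be repeated such that B is a substring of it.py | min_repetitions
-- ===== SOURCE A (Python) =====
-- def min_repetitions(a, b):
--     len_a = len(a)
--     len_b = len(b)
--
--     for i in range(0, len_a):
--
--         if a[i] == b[0]:
--             k = i
--             count = 1
--             for j in range(0, len_b):
--
--
--                 if k >= len_a:
--                     k = 0
--                     count = count + 1
--
--                 if a[k] != b[j]:
--                     break
--                 k = k + 1
--
--             else:
--                 return count
--     return -1
-- ===== SOURCE B (Python) =====
-- def min_repetitions(a, b):
--     if not a: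
--         return -1
--     reps = len(b) // len(a) + 2
--     s = a * reps
--     pos = s.find(b)
--     if pos == -1:
--         return -1
--     return (pos + len(b) + len(a) - 1) // len(a)
-- ===== Notes on version B (the rewrite author's own statement) =====
-- stated objective: faster
-- what changed: A scans every start position of a and re-walks b with hand-maintained wrap-around index and repetition counter; B builds a repetition of a long enough to contain any match (len(b)//len(a)+2 copies), runs one str.find for b, and recovers the repetition count from the match position by a closed-form ceiling division.
import Mathlib
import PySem

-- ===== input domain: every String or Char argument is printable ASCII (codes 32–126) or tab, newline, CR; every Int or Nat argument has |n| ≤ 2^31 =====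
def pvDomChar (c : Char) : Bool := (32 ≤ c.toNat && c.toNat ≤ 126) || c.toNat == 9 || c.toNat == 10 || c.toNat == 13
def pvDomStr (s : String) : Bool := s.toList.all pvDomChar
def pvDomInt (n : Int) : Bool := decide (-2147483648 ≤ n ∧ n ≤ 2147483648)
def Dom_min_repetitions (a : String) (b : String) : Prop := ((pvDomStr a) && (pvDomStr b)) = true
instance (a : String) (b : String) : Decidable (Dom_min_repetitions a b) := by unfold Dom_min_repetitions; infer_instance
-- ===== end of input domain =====

-- B replaces A's nested scan of b restarted at every start position of a by one substring search
-- (str.find, C-level) in a sufficiently repeated copy of a plus a closed-form repetition count.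

-- ===== PORT A =====
-- inner 'for j in range(0, len_b)' loop: state (k, count); 'none' = break, 'some count' = for-else return
def pvInnerA (la lb : List Char) : List Int → Int → Int → Option Int
  | [], _, count => some count
  | j :: js, k, count =>
    let k2 := if (la.length : Int) ≤ k then 0 else k
    let count2 := if (la.length : Int) ≤ k then count + 1 else count
    if PySem.List.pyGetD la k2 '?' ≠ PySem.List.pyGetD lb j '?' then none
    else pvInnerA la lb js (k2 + 1) count2

-- outer 'for i in range(0, len_a)' loop ('?' defaults are never reached inside Pre_)
def pvOuterA (la lb : List Char) : List Int → Int
  | [] => -1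
  | i :: rest =>
    if PySem.List.pyGetD la i '?' = PySem.List.pyGetD lb 0 '?' then
      match pvInnerA la lb (PySem.List.pyRange 0 (lb.length : Int) 1) i 1 with
      | some c => c
      | none => pvOuterA la lb rest
    else pvOuterA la lb rest

def min_repetitions (a : String) (b : String) : Int :=
  pvOuterA a.toList b.toList (PySem.List.pyRange 0 (a.toList.length : Int) 1)

-- ===== PORT B =====
def min_repetitions_alt (a : String) (b : String) : Int :=
  let la := a.toList
  let lb := b.toList
  if la = [] then -1
  else
    let s := PySem.List.pyRepeat la (PySem.Int.floordiv (lb.length : Int) (la.length : Int) + 2)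
    let pos := PySem.Chars.find s lb
    if pos = -1 then -1
    else PySem.Int.floordiv (pos + (lb.length : Int) + (la.length : Int) - 1) (la.length : Int)

-- ===== PRECONDITION & SPEC =====
-- Pre_ excludes exactly the inputs where A raises: b == "" with a != "" (A reads b[0] -> IndexError).
def Pre_min_repetitions (a : String) (b : String) : Prop := a = "" ∨ b ≠ ""
instance (a : String) (b : String) : Decidable (Pre_min_repetitions a b) := by
  unfold Pre_min_repetitions; infer_instance

def pvWitness_min_repetitions : String × String := ("ab", "bab")

def Spec_min_repetitions (a : String) (b : String) (out : Int) : Prop := out = min_repetitions_alt a b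
instance (a : String) (b : String) (out : Int) : Decidable (Spec_min_repetitions a b out) := by
  unfold Spec_min_repetitions; infer_instance

-- ===== CLAIM (what is proved, stated in full; the proofs are below) =====
def Claim_equal_min_repetitions : Prop := ∀ (a : String) (b : String), Dom_min_repetitions a b → Pre_min_repetitions a b → Spec_min_repetitions a b (min_repetitions a b)

-- ===== LEMMAS AND PROOFS =====

-- 'a wraps around starting at i matches b' as a Bool over the first period
def pvQ (la lb : List Char) (i : Nat) : Bool :=
  (List.range lb.length).all fun j => la.getD ((i + j) % la.length) '?' == lb.getD j '?'

lemma pvQ_iff (la lb : List Char) (i : Nat) :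
    pvQ la lb i = true ↔ ∀ j < lb.length, la.getD ((i + j) % la.length) '?' = lb.getD j '?' := by
  simp [pvQ]

lemma pv_mod_succ (n x : Nat) (hn : 0 < n) :
    (x + 1) % n = if x % n + 1 = n then 0 else x % n + 1 := by
  have hx := Nat.div_add_mod x n
  split_ifs with h
  · have : x + 1 = n * (x / n + 1) := by rw [Nat.mul_add, Nat.mul_one]; omega
    rw [this, Nat.mul_mod_right]
  · have hlt : x % n + 1 < n := by have := Nat.mod_lt x hn; omega
    have : x + 1 = n * (x / n) + (x % n + 1) := by omega
    rw [this, Nat.mul_add_mod, Nat.mod_eq_of_lt hlt]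

lemma pv_div_succ (n x : Nat) (hn : 0 < n) :
    (x + 1) / n = if x % n + 1 = n then x / n + 1 else x / n := by
  have hx := Nat.div_add_mod x n
  split_ifs with h
  · have : x + 1 = n * (x / n + 1) := by rw [Nat.mul_add, Nat.mul_one]; omega
    rw [this, Nat.mul_div_cancel_left _ hn]
  · have hlt : x % n + 1 < n := by have := Nat.mod_lt x hn; omega
    have : x + 1 = n * (x / n) + (x % n + 1) := by omega
    rw [this, Nat.mul_add_div hn, Nat.div_eq_of_lt hlt]
    omega

lemma pvInnerA_spec (la lb : List Char) (i : Nat) (hi : i < la.length) :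
    ∀ d j, j + d = lb.length → ∀ (k c : Int),
    (if (la.length : Int) ≤ k then (0 : Int) else k) = (((i + j) % la.length : Nat) : Int) →
    (if (la.length : Int) ≤ k then c + 1 else c) = (((i + j) / la.length : Nat) : Int) + 1 →
    (j = lb.length → c = (((i + lb.length - 1) / la.length : Nat) : Int) + 1) →
    pvInnerA la lb (PySem.List.pyRange (j : Int) (lb.length : Int) 1) k c =
      if (∀ j', j ≤ j' → j' < lb.length → la.getD ((i + j') % la.length) '?' = lb.getD j' '?')
      then some ((((i + lb.length - 1) / la.length : Nat) : Int) + 1) else none := by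
  have hn : 0 < la.length := by omega
  intro d
  induction d with
  | zero =>
    intro j hd k c hk hc hbase
    have hj : j = lb.length := by omega
    rw [PySem.List.pyRange_one_eq_nil (by exact_mod_cast hj.ge)]
    rw [if_pos (fun j' h1 h2 => by omega)]
    simp only [pvInnerA]
    rw [hbase hj]
  | succ d ih =>
    intro j hd k c hk hc hbase
    have hj : j < lb.length := by omega
    rw [PySem.List.pyRange_one_cons (by exact_mod_cast hj)]
    simp only [pvInnerA]
    rw [hk, hc]
    simp only [PySem.List.pyGetD_natCast]
    by_cases hcmp : la.getD ((i + j) % la.length) '?' = lb.getD j '?'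
    · rw [if_neg (not_not_intro hcmp)]
      have hcond : (∀ j', j ≤ j' → j' < lb.length → la.getD ((i + j') % la.length) '?' = lb.getD j' '?')
          ↔ (∀ j', j + 1 ≤ j' → j' < lb.length → la.getD ((i + j') % la.length) '?' = lb.getD j' '?') := by
        constructor
        · exact fun h j' h1 h2 => h j' (by omega) h2
        · intro h j' h1 h2
          rcases Nat.eq_or_lt_of_le h1 with rfl | h1'
          · exact hcmp
          · exact h j' h1' h2
      rw [if_congr hcond rfl rfl]
      have hcast : ((j : Int) + 1) = ((j + 1 : Nat) : Int) := by push_cast; ring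
      rw [hcast]
      have hrlt := Nat.mod_lt (i + j) hn
      have e1 : i + (j + 1) = (i + j) + 1 := by ring
      refine ih (j + 1) (by omega) _ _ ?_ ?_ ?_
      · rw [e1, pv_mod_succ _ _ hn]
        split_ifs <;> omega
      · rw [e1, pv_div_succ _ _ hn]
        split_ifs <;> omega
      · intro h
        have e2 : i + j = i + lb.length - 1 := by omega
        rw [e2]
    · rw [if_pos hcmp]
      rw [if_neg (fun hC => hcmp (hC j le_rfl hj))]

lemma pvOuterA_spec (la lb : List Char) (hla : la ≠ []) (hlb : lb ≠ []) :
    ∀ d i0, i0 + d = la.length →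
    pvOuterA la lb (PySem.List.pyRange (i0 : Int) (la.length : Int) 1) =
      match (List.range' i0 d).find? (pvQ la lb) with
      | some i => (((i + lb.length - 1) / la.length : Nat) : Int) + 1
      | none => -1 := by
  have hn : 0 < la.length := List.length_pos_iff.mpr hla
  have hm : 0 < lb.length := List.length_pos_iff.mpr hlb
  intro d
  induction d with
  | zero =>
    intro i0 hd
    rw [PySem.List.pyRange_one_eq_nil (by omega)]
    simp [pvOuterA]
  | succ d ih =>
    intro i0 hd
    have hi0 : i0 < la.length := by omega
    rw [PySem.List.pyRange_one_cons (by exact_mod_cast hi0)]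
    simp only [pvOuterA]
    have hzero : (0 : Int) = ((0 : Nat) : Int) := rfl
    have hinner := pvInnerA_spec la lb i0 hi0 lb.length 0 (by omega) (i0 : Int) 1
      (by rw [if_neg (by omega), Nat.add_zero, Nat.mod_eq_of_lt hi0])
      (by rw [if_neg (by omega), Nat.add_zero, Nat.div_eq_of_lt hi0]; simp)
      (by intro h; omega)
    rw [hzero, hinner]
    have hguard : (PySem.List.pyGetD la (i0 : Int) '?' = PySem.List.pyGetD lb ((0 : Nat) : Int) '?')
        ↔ la.getD i0 '?' = lb.getD 0 '?' := by
      simp [PySem.List.pyGetD_natCast, PySem.List.pyGetD_zero]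
    have hQ : pvQ la lb i0 = true ↔
        (∀ j', 0 ≤ j' → j' < lb.length → la.getD ((i0 + j') % la.length) '?' = lb.getD j' '?') := by
      rw [pvQ_iff]
      constructor
      · exact fun h j' _ h2 => h j' h2
      · exact fun h j' h2 => h j' (by omega) h2
    rw [List.range'_succ]
    by_cases hq : pvQ la lb i0 = true
    · rw [List.find?_cons_of_pos (h := hq)]
      have hg : la.getD i0 '?' = lb.getD 0 '?' := by
        have := (pvQ_iff la lb i0).mp hq 0 hm
        rwa [Nat.add_zero, Nat.mod_eq_of_lt hi0] at this
      rw [if_pos (hguard.mpr hg), if_pos (hQ.mp hq)]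
    · rw [List.find?_cons_of_neg (h := by simp [hq])]
      have hnotQ : ¬ (∀ j', 0 ≤ j' → j' < lb.length → la.getD ((i0 + j') % la.length) '?' = lb.getD j' '?') :=
        fun h => hq (hQ.mpr h)
      have hrec : ((i0 : Int) + 1) = ((i0 + 1 : Nat) : Int) := by push_cast; ring
      by_cases hg : PySem.List.pyGetD la (i0 : Int) '?' = PySem.List.pyGetD lb ((0 : Nat) : Int) '?'
      · rw [if_pos hg, if_neg hnotQ, hrec]
        exact ih (i0 + 1) (by omega)
      · rw [if_neg hg, hrec]
        exact ih (i0 + 1) (by omega)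

lemma pv_repeat_natCast (xs : List Char) (t : Nat) :
    PySem.List.pyRepeat xs (t : Int) = (List.replicate t xs).flatten := by
  unfold PySem.List.pyRepeat; norm_num

lemma pv_flatten_replicate_length (xs : List Char) (t : Nat) :
    ((List.replicate t xs).flatten).length = t * xs.length := by
  induction t with
  | zero => simp
  | succ t ih => simp [List.replicate_succ, ih]; ring

lemma pv_flatten_replicate_getD (xs : List Char) (t p : Nat) (hp : p < t * xs.length) :
    ((List.replicate t xs).flatten).getD p '?' = xs.getD (p % xs.length) '?' := by
  induction t generalizing p with
  | zero => omega
  | succ t ih =>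
    have hexp : (t + 1) * xs.length = t * xs.length + xs.length := by ring
    rw [List.replicate_succ, List.flatten_cons]
    by_cases h : p < xs.length
    · rw [List.getD_append _ _ _ _ h, Nat.mod_eq_of_lt h]
    · push Not at h
      rw [List.getD_append_right _ _ _ _ h, ih (p - xs.length) (by omega)]
      congr 1
      have : p = (p - xs.length) + xs.length := by omega
      conv_rhs => rw [this, Nat.add_mod_right]

lemma pv_prefix_iff_getD (u v : List Char) :
    u <+: v ↔ u.length ≤ v.length ∧ ∀ j < u.length, v.getD j '?' = u.getD j '?' := by
  rw [List.prefix_iff_eq_take]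
  constructor
  · intro h
    have hlen : u.length ≤ v.length := by
      conv_lhs => rw [h]
      simp
    refine ⟨hlen, fun j hj => ?_⟩
    conv_rhs => rw [h]
    rw [List.getD_eq_getElem _ _ (by omega), List.getD_eq_getElem _ _ (by simpa using by omega)]
    simp [List.getElem_take]
  · rintro ⟨hlen, h⟩
    apply List.ext_getElem
    · simp [hlen]
    · intro j h1 h2
      have hj : j < u.length := h1
      have := h j hj
      rw [List.getD_eq_getElem _ _ (by omega), List.getD_eq_getElem _ _ hj] at this
      simpa [List.getElem_take] using this.symm

-- b is a prefix of s.drop p  ↔  length fits and b matches a period-wise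
lemma pv_P_iff (la lb : List Char) (hlb : lb ≠ []) (t p : Nat) :
    lb <+: ((List.replicate t la).flatten).drop p ↔
      p + lb.length ≤ t * la.length ∧
      ∀ j < lb.length, la.getD ((p + j) % la.length) '?' = lb.getD j '?' := by
  have hs : ((List.replicate t la).flatten).length = t * la.length := pv_flatten_replicate_length la t
  have hm : 0 < lb.length := List.length_pos_iff.mpr hlb
  have hlen : (((List.replicate t la).flatten).drop p).length = t * la.length - p := by simp [hs]
  rw [pv_prefix_iff_getD, hlen]
  constructor
  · rintro ⟨h1, h2⟩
    have hfit : p + lb.length ≤ t * la.length := by omega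
    refine ⟨hfit, fun j hj => ?_⟩
    have hb : p + j < t * la.length := by omega
    have h := h2 j hj
    rw [List.getD_eq_getElem _ _ (by rw [hlen]; omega)] at h
    rw [List.getElem_drop] at h
    rw [← pv_flatten_replicate_getD la t (p + j) hb,
        List.getD_eq_getElem _ _ (by rw [hs]; omega)]
    exact h
  · rintro ⟨hfit, h2⟩
    refine ⟨by omega, fun j hj => ?_⟩
    have hb : p + j < t * la.length := by omega
    have h := h2 j hj
    rw [← pv_flatten_replicate_getD la t (p + j) hb,
        List.getD_eq_getElem _ _ (by rw [hs]; omega)] at h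
    rw [List.getD_eq_getElem _ _ (by rw [hlen]; omega), List.getElem_drop]
    exact h

lemma pv_find?_range'_aux (q : Nat → Bool) (p0 : Nat) (h2 : q p0 = true)
    (h3 : ∀ i < p0, q i = false) :
    ∀ len s, s ≤ p0 → p0 < s + len → (List.range' s len).find? q = some p0 := by
  intro len
  induction len with
  | zero => omega
  | succ len ih =>
    intro s hs1 hs2
    rw [List.range'_succ]
    by_cases hqs : q s = true
    · have hsp : s = p0 := by
        by_contra hne
        exact absurd hqs (by simp [h3 s (by omega)])
      rw [List.find?_cons_of_pos (h := hqs), hsp]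
    · have hne : s ≠ p0 := fun h => hqs (h ▸ h2)
      rw [List.find?_cons_of_neg (h := by simp [hqs])]
      exact ih (s + 1) (by omega) (by omega)

lemma pv_find?_range'_eq_some (q : Nat → Bool) (n p0 : Nat) (h1 : p0 < n) (h2 : q p0 = true)
    (h3 : ∀ i < p0, q i = false) : (List.range' 0 n).find? q = some p0 :=
  pv_find?_range'_aux q p0 h2 h3 n 0 (by omega) (by omega)

-- ===== VERDICT (by name: the statement is the Claim_ definition above) =====
lemma pv_infix_of_prefix_drop (s lb : List Char) (p : Nat) (h : lb <+: s.drop p) :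
    PySem.Chars.find s lb ≠ -1 := by
  rw [PySem.Chars.find_ne_neg_one_iff, ← PySem.Chars.isIn_iff_infix,
      ← PySem.Chars.exists_prefix_drop_iff_isIn]
  exact ⟨p, h⟩

theorem min_repetitions_spec : Claim_equal_min_repetitions := by
  intro a b _ hpre
  unfold Spec_min_repetitions min_repetitions min_repetitions_alt
  by_cases ha : a.toList = []
  · rw [ha]
    simp [pvOuterA, PySem.List.pyRange_one_eq_nil (le_refl (0 : Int))]
  · have hb : b.toList ≠ [] := by
      rcases hpre with h | h
      · exact absurd (by rw [h]; rfl) ha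
      · exact fun hbl => h (String.toList_eq_nil_iff.mp hbl)
    simp only [if_neg ha]
    set la := a.toList with hla
    set lb := b.toList with hlb
    have hn : 0 < la.length := List.length_pos_iff.mpr ha
    have hm : 0 < lb.length := List.length_pos_iff.mpr hb
    -- normalize B's repeated string
    have hreps : PySem.Int.floordiv (lb.length : Int) (la.length : Int) + 2
        = ((lb.length / la.length + 2 : Nat) : Int) := by
      rw [PySem.Int.floordiv_natCast]; push_cast; ring
    rw [hreps, pv_repeat_natCast]
    set t := lb.length / la.length + 2 with ht
    set s := (List.replicate t la).flatten with hs
    -- arithmetic bracket for t * la.length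
    have hdm := Nat.div_add_mod lb.length la.length
    have hmod := Nat.mod_lt lb.length hn
    have htn : t * la.length = la.length * (lb.length / la.length) + 2 * la.length := by
      rw [ht]; ring
    -- A's loop in closed form
    have hA := pvOuterA_spec la lb ha hb la.length 0 (by omega)
    rw [Nat.cast_zero] at hA
    rw [hA]
    by_cases hfind : PySem.Chars.find s lb = -1
    · -- not found anywhere: A finds no start either
      rw [if_pos hfind]
      have hF : (List.range' 0 la.length).find? (pvQ la lb) = none := by
        cases hF : (List.range' 0 la.length).find? (pvQ la lb) with
        | none => rfl
        | some i =>
          have hqi := List.find?_some hF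
          have hi : i < la.length := by
            have := List.mem_of_find?_eq_some hF
            simp [List.mem_range'_1] at this
            omega
          have hP : lb <+: s.drop i := by
            rw [hs, pv_P_iff la lb hb t i]
            exact ⟨by omega, (pvQ_iff la lb i).mp hqi⟩
          exact absurd hfind (pv_infix_of_prefix_drop s lb i hP)
      rw [hF]
    · rw [if_neg hfind]
      have hge : 0 ≤ PySem.Chars.find s lb := by
        have := PySem.Chars.neg_one_le_find s lb
        omega
      obtain ⟨hpre0, hmin⟩ := PySem.Chars.find_spec hge
      set p0 := (PySem.Chars.find s lb).toNat with hp0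
      have hPp0 : lb <+: s.drop p0 := hpre0
      rw [hs, pv_P_iff la lb hb t p0] at hPp0
      obtain ⟨hfit, hpoint⟩ := hPp0
      -- the first occurrence lies in the first copy of a
      have hp0n : p0 < la.length := by
        by_contra hge2
        push Not at hge2
        have hP' : lb <+: s.drop (p0 - la.length) := by
          rw [hs, pv_P_iff la lb hb t (p0 - la.length)]
          refine ⟨by omega, fun j hj => ?_⟩
          have : p0 - la.length + j + la.length = p0 + j := by omega
          rw [← Nat.add_mod_right (p0 - la.length + j) la.length, this]
          exact hpoint j hj
        exact hmin (p0 - la.length) (by omega) hP'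
      -- A's scan finds exactly p0
      have hF : (List.range' 0 la.length).find? (pvQ la lb) = some p0 := by
        apply pv_find?_range'_eq_some _ _ _ hp0n ((pvQ_iff la lb p0).mpr hpoint)
        intro i hi
        rw [← Bool.not_eq_true]
        intro hqi
        have hP : lb <+: s.drop i := by
          rw [hs, pv_P_iff la lb hb t i]
          exact ⟨by omega, (pvQ_iff la lb i).mp hqi⟩
        exact hmin i hi hP
      rw [hF]
      -- both closed forms agree
      have hcast : PySem.Chars.find s lb + (lb.length : Int) + (la.length : Int) - 1
          = ((p0 + lb.length + la.length - 1 : Nat) : Int) := by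
        have := Int.toNat_of_nonneg hge
        omega
      rw [hcast, PySem.Int.floordiv_natCast]
      have hsplit : p0 + lb.length + la.length - 1 = (p0 + lb.length - 1) + la.length := by omega
      rw [hsplit, Nat.add_div_right _ hn]
      push_cast
      ring
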